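-- pv_equiv track=rewrite | github.com/papajo/schemaGenius | backend/app/core/parsing_engine/parsers/csv_parser.py | _clean_csv_header
-- ===== SOURCE A (Python) =====
-- def _clean_csv_header(header_name: str) -> str:
--     """Cleans a CSV header name to be a valid and more standard identifier."""
--     if not header_name:
--         return "unnamed_column"
--     name = header_name.strip().strip("'\"") # Remove surrounding quotes and whitespace
--     # Replace spaces and common special characters with underscores
--     name = name.replace(" ", "_").replace("-", "_").replace(".", "_").replace("/", "_")
--     # Remove any other non-alphanumeric characters (except underscore) that might remain
--     name = ''.join(c for c in name if c.isalnum() or c == '_')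
--     # Ensure it doesn't start with a number (prepend underscore if so)
--     if name and name[0].isdigit():
--         name = "_" + name
--     # Handle potential multiple underscores from replacements
--     name = "_".join(filter(None, name.split('_')))
--     return name if name else "unnamed_column"
-- ===== SOURCE B (Python) =====
-- def _clean_csv_header(header_name: str) -> str:
--     """Cleans a CSV header name to be a valid and more standard identifier."""
--     if not header_name:
--         return "unnamed_column"
--     out = []
--     for c in header_name.strip().strip("'\""):
--         if c in " -./":
--             c = "_"
--         if c.isalnum():
--             out.append(c)
--         elif c == "_" and out and out[-1] != "_":
--             out.append("_")
--     if out and out[-1] == "_":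
--         out.pop()
--     return "".join(out) or "unnamed_column"
-- ===== Notes on version B (the rewrite author's own statement) =====
-- stated objective: simpler
-- what changed: Replaces A's multi-pass pipeline (four str.replace passes, a filtering join, a digit-prepend, and a split/filter/join underscore collapse) with a single left-to-right pass that maps separators to underscore, keeps alphanumerics, collapses runs and drops a leading underscore inline by checking the last emitted character, then strips one trailing underscore; the digit-prepend is omitted as a no-op because A's own collapse step always removes that prepended leading underscore.
import Mathlib
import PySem

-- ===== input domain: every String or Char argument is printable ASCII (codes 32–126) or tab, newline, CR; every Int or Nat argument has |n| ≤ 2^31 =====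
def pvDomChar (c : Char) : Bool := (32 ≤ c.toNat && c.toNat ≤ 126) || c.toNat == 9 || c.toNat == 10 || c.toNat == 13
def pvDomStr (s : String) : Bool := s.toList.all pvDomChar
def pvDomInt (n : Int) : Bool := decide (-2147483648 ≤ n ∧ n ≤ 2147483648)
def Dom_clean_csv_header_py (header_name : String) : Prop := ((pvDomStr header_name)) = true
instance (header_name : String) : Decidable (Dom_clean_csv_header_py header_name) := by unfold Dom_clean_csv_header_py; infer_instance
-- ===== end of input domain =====

-- B replaces A's multi-pass pipeline (four replaces, filter-join, digit-prepend, split/filter/join collapse)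
-- by a single pass with inline underscore collapsing; objective: simpler. Return value only; no mutation.

-- ===== PORT A =====
def clean_csv_header_py (header_name : String) : String :=
  if header_name.toList = [] then "unnamed_column"
  else
    let name := PySem.Chars.stripChars (PySem.Chars.strip header_name.toList) ['\'', '"']
    let name := PySem.Chars.replace (PySem.Chars.replace (PySem.Chars.replace
                  (PySem.Chars.replace name [' '] ['_']) ['-'] ['_']) ['.'] ['_']) ['/'] ['_']
    let name := name.filter (fun c => PySem.Chars.isalnum c || c == '_')
    let name := if name ≠ [] ∧ PySem.Chars.isdigit (name.headD ' ') = true then '_' :: name else name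
    let name := PySem.Chars.join ['_'] ((PySem.Chars.splitOn name ['_']).filter (fun p => !p.isEmpty))
    if name ≠ [] then String.ofList name else "unnamed_column"

-- ===== PORT B =====
-- B-side helpers: the separator map and the one-pass step of Source B's loop body
def pvNorm (c : Char) : Char := if c = ' ' ∨ c = '-' ∨ c = '.' ∨ c = '/' then '_' else c

def pvStep (acc : List Char) (c : Char) : List Char :=
  let c := pvNorm c
  if PySem.Chars.isalnum c then acc ++ [c]
  else if c = '_' ∧ acc ≠ [] ∧ acc.getLast? ≠ some '_' then acc ++ ['_']
  else acc

def clean_csv_header_py_alt (header_name : String) : String :=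
  if header_name.toList = [] then "unnamed_column"
  else
    let s := PySem.Chars.stripChars (PySem.Chars.strip header_name.toList) ['\'', '"']
    let out := s.foldl pvStep []
    let out := if out.getLast? = some '_' then out.dropLast else out
    if out ≠ [] then String.ofList out else "unnamed_column"

-- ===== PRECONDITION & SPEC =====
def Spec_clean_csv_header_py (header_name : String) (out : String) : Prop := out = clean_csv_header_py_alt header_name
instance (header_name : String) (out : String) : Decidable (Spec_clean_csv_header_py header_name out) := by unfold Spec_clean_csv_header_py; infer_instance

-- ===== CLAIM (what is proved, stated in full; the proofs are below) =====
def Claim_equal_clean_csv_header_py : Prop := ∀ (header_name : String), Dom_clean_csv_header_py header_name → Spec_clean_csv_header_py header_name (clean_csv_header_py header_name)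

-- ===== LEMMAS AND PROOFS =====

-- structural models of A's split/join collapse and B's one-pass loop, and shared lemmas

def splitU : List Char → List (List Char)
  | [] => [[]]
  | c :: t => if c = '_' then [] :: splitU t
              else match splitU t with
                   | [] => [[c]]
                   | h :: r => (c :: h) :: r

def consHead (p : List Char) : List (List Char) → List (List Char)
  | [] => [p]
  | h :: r => (p ++ h) :: r

def joinRest : List (List Char) → List Char
  | [] => []
  | p :: r => '_' :: PySem.Chars.join ['_'] (p :: r)

mutual
def G1 : List Char → List Char
  | [] => []
  | c :: t =>
      if PySem.Chars.isalnum (pvNorm c) then pvNorm c :: G1 t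
      else if pvNorm c = '_' then G2 t
      else G1 t
def G2 : List Char → List Char
  | [] => []
  | c :: t =>
      if PySem.Chars.isalnum (pvNorm c) then '_' :: pvNorm c :: G1 t
      else G2 t
end

def G0 : List Char → List Char
  | [] => []
  | c :: t => if PySem.Chars.isalnum (pvNorm c) then pvNorm c :: G1 t else G0 t

mutual
def f1 : List Char → List Char
  | [] => []
  | c :: t =>
      if PySem.Chars.isalnum (pvNorm c) then pvNorm c :: f1 t
      else if pvNorm c = '_' then '_' :: f2 t
      else f1 t
def f2 : List Char → List Char
  | [] => []
  | c :: t =>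
      if PySem.Chars.isalnum (pvNorm c) then pvNorm c :: f1 t
      else f2 t
end

def f0 : List Char → List Char
  | [] => []
  | c :: t => if PySem.Chars.isalnum (pvNorm c) then pvNorm c :: f1 t else f0 t

def stripT (d : List Char) : List Char := if d.getLast? = some '_' then d.dropLast else d

def mList (l : List Char) : List Char :=
  (l.map pvNorm).filter (fun c => PySem.Chars.isalnum c || c == '_')

def JU (x : List Char) : List Char :=
  PySem.Chars.join ['_'] ((splitU x).filter (fun p => !p.isEmpty))

lemma isalnum_underscore : PySem.Chars.isalnum '_' = false := by decide

lemma alnum_ne_underscore {c : Char} (h : PySem.Chars.isalnum c = true) : c ≠ '_' := by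
  intro e; rw [e, isalnum_underscore] at h; exact absurd h (by simp)

lemma splitU_ne_nil (l : List Char) : splitU l ≠ [] := by
  cases l with
  | nil => simp [splitU]
  | cons c t =>
      simp only [splitU]
      split
      · simp
      · split <;> simp

lemma replace_go_single (a : Char) :
    ∀ (l : List Char) (fuel : Nat) (acc : List Char), l.length ≤ fuel →
      PySem.Chars.replace.go [a] ['_'] fuel l acc
        = acc.reverse ++ l.map (fun c => if c = a then '_' else c) := by
  intro l
  induction l with
  | nil =>
      intro fuel acc _
      cases fuel <;> simp [PySem.Chars.replace.go]
  | cons c t ih =>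
      intro fuel acc h
      cases fuel with
      | zero => simp at h
      | succ n =>
        rw [PySem.Chars.replace.go]
        by_cases hc : c = a
        · simp [hc, List.isPrefixOf, ih n ('_' :: acc) (by simpa using h)]
        · simp [List.isPrefixOf, hc, Ne.symm hc, ih n (c :: acc) (by simpa using h)]

lemma replace_single (a : Char) (l : List Char) :
    PySem.Chars.replace l [a] ['_'] = l.map (fun c => if c = a then '_' else c) := by
  rw [PySem.Chars.replace]
  simp [replace_go_single a l l.length [] le_rfl]

lemma replace_chain (l : List Char) :
    PySem.Chars.replace (PySem.Chars.replace (PySem.Chars.replace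
      (PySem.Chars.replace l [' '] ['_']) ['-'] ['_']) ['.'] ['_']) ['/'] ['_'] = l.map pvNorm := by
  simp only [replace_single, List.map_map]
  apply List.map_congr_left
  intro c _
  simp only [Function.comp, pvNorm]
  by_cases h1 : c = ' ' <;> by_cases h2 : c = '-' <;> by_cases h3 : c = '.' <;> by_cases h4 : c = '/' <;>
    simp_all

lemma split_go_spec :
    ∀ (l : List Char) (fuel : Nat) (cur : List Char) (acc : List (List Char)), l.length < fuel →
      PySem.Chars.splitOn.go ['_'] fuel l cur acc = acc.reverse ++ consHead cur.reverse (splitU l) := by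
  intro l
  induction l with
  | nil =>
      intro fuel cur acc h
      cases fuel with
      | zero => omega
      | succ n => simp [PySem.Chars.splitOn.go, splitU, consHead]
  | cons c t ih =>
      intro fuel cur acc h
      cases fuel with
      | zero => omega
      | succ n =>
        rw [PySem.Chars.splitOn.go]
        by_cases hc : c = '_'
        · simp only [hc, List.isPrefixOf, Bool.and_true, beq_self_eq_true, if_true, List.length_cons, List.length_nil, Nat.zero_add, List.drop_succ_cons, List.drop_zero]
          rw [ih n [] (cur.reverse :: acc) (by simpa using h)]
          rcases hs : splitU t with _ | ⟨sh, sr⟩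
          · exact absurd hs (splitU_ne_nil t)
          · simp [splitU, hs, consHead]
        · simp only [List.isPrefixOf, Bool.and_eq_true, beq_iff_eq]
          rw [if_neg (by simp [Ne.symm hc])]
          rw [ih n (c :: cur) acc (by simpa using h)]
          rcases hs : splitU t with _ | ⟨sh, sr⟩
          · exact absurd hs (splitU_ne_nil t)
          · simp [splitU, hs, consHead, hc]

lemma splitOn_underscore (l : List Char) : PySem.Chars.splitOn l ['_'] = splitU l := by
  rw [PySem.Chars.splitOn]
  rw [split_go_spec l (l.length + 1) [] [] (by omega)]
  rcases hs : splitU l with _ | ⟨sh, sr⟩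
  · exact absurd hs (splitU_ne_nil l)
  · simp [consHead]

lemma join_cons (p : List Char) (ps : List (List Char)) :
    PySem.Chars.join ['_'] (p :: ps) = p ++ joinRest ps := by
  cases ps with
  | nil => simp [joinRest, PySem.Chars.join, List.intercalate]
  | cons q r => simp [joinRest, PySem.Chars.join, List.intercalate, List.intersperse]

lemma mList_cons (c : Char) (u : List Char) :
    mList (c :: u) = if (PySem.Chars.isalnum (pvNorm c) || pvNorm c == '_') then pvNorm c :: mList u else mList u := by
  simp only [mList, List.map_cons, List.filter_cons]

lemma splitU_cons_ne (c : Char) (x : List Char) (hc : c ≠ '_') :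
    ∀ h r, splitU x = h :: r → splitU (c :: x) = (c :: h) :: r := by
  intro h r he
  simp only [splitU, if_neg hc, he]

lemma H12 (t : List Char) :
    (∀ h r, splitU (mList t) = h :: r → h ++ joinRest (r.filter (fun p => !p.isEmpty)) = G1 t)
    ∧ joinRest (((splitU (mList t)).filter (fun p => !p.isEmpty))) = G2 t := by
  induction t with
  | nil =>
      constructor
      · intro h r he
        simp [mList, splitU] at he
        obtain ⟨h1, h2⟩ := he
        subst h1; subst h2
        simp [joinRest, G1]
      · simp [mList, splitU, joinRest, G2]
  | cons c u ih =>
      rcases hs : splitU (mList u) with _ | ⟨sh, sr⟩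
      · exact absurd hs (splitU_ne_nil _)
      by_cases ha : PySem.Chars.isalnum (pvNorm c) = true
      · have hm : mList (c :: u) = pvNorm c :: mList u := by rw [mList_cons]; simp [ha]
        have hsc := splitU_cons_ne (pvNorm c) (mList u) (alnum_ne_underscore ha) sh sr hs
        constructor
        · intro h r he
          rw [hm] at he
          rw [hsc] at he
          injection he with e1 e2
          subst e1; subst e2
          simp only [List.cons_append, G1, if_pos ha]
          rw [(ih.1 sh sr hs)]
        · rw [hm, hsc]
          simp only [List.filter_cons, List.isEmpty_cons, Bool.not_false, if_pos]
          rw [joinRest, join_cons]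
          simp only [List.cons_append]
          rw [(ih.1 sh sr hs)]
          simp [G2, ha]
      · by_cases hu : pvNorm c = '_'
        · have hm : mList (c :: u) = '_' :: mList u := by rw [mList_cons]; simp [hu]
          have hsc : splitU (mList (c :: u)) = [] :: splitU (mList u) := by
            rw [hm, splitU]; simp
          constructor
          · intro h r he
            rw [hsc] at he
            injection he with e1 e2
            subst e1; subst e2
            simp only [List.nil_append, G1, if_neg ha, if_pos hu]
            rw [hs] at ih ⊢
            simpa using ih.2
          · rw [hsc]
            have hf : List.filter (fun p : List Char => !p.isEmpty) ([] :: splitU (mList u))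
                = List.filter (fun p => !p.isEmpty) (splitU (mList u)) := by simp
            rw [hf, G2, if_neg ha]
            exact ih.2
        · have hm : mList (c :: u) = mList u := by rw [mList_cons]; simp [ha, hu]
          constructor
          · intro h r he
            rw [hm] at he
            rw [G1, if_neg ha, if_neg hu]
            exact ih.1 h r he
          · rw [hm, G2, if_neg ha]
            exact ih.2

lemma JU_mList (t : List Char) : JU (mList t) = G0 t := by
  induction t with
  | nil => simp [JU, mList, splitU, PySem.Chars.join, List.intercalate, G0]
  | cons c u ih =>
      rcases hs : splitU (mList u) with _ | ⟨sh, sr⟩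
      · exact absurd hs (splitU_ne_nil _)
      by_cases ha : PySem.Chars.isalnum (pvNorm c) = true
      · have hm : mList (c :: u) = pvNorm c :: mList u := by rw [mList_cons]; simp [ha]
        rw [JU, hm, splitU_cons_ne (pvNorm c) (mList u) (alnum_ne_underscore ha) sh sr hs]
        simp only [List.filter_cons, List.isEmpty_cons, Bool.not_false, if_pos]
        rw [join_cons, G0, if_pos ha]
        simp only [List.cons_append]
        rw [(H12 u).1 sh sr hs]
      · rw [G0, if_neg ha]
        rw [← ih, JU, JU]
        by_cases hu : pvNorm c = '_'
        · have hm : mList (c :: u) = '_' :: mList u := by rw [mList_cons]; simp [hu]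
          rw [hm]
          have : splitU ('_' :: mList u) = [] :: splitU (mList u) := by rw [splitU]; simp
          rw [this]
          simp
        · have hm : mList (c :: u) = mList u := by rw [mList_cons]; simp [ha, hu]
          rw [hm]

lemma JU_underscore (x : List Char) : JU ('_' :: x) = JU x := by
  rw [JU, JU]
  have : splitU ('_' :: x) = [] :: splitU x := by rw [splitU]; simp
  rw [this]
  simp

lemma foldB (t : List Char) :
    (∀ acc : List Char, acc ≠ [] → acc.getLast? ≠ some '_' →
        List.foldl pvStep acc t = acc ++ f1 t)
    ∧ (∀ acc : List Char, acc.getLast? = some '_' →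
        List.foldl pvStep acc t = acc ++ f2 t) := by
  induction t with
  | nil => constructor <;> intro acc <;> simp [f1, f2]
  | cons c u ih =>
      by_cases ha : PySem.Chars.isalnum (pvNorm c) = true
      · constructor
        · intro acc hne hlast
          simp only [List.foldl_cons, pvStep, if_pos ha]
          rw [ih.1 (acc ++ [pvNorm c]) (by simp) (by simp [alnum_ne_underscore ha])]
          simp [f1, ha]
        · intro acc hlast
          simp only [List.foldl_cons, pvStep, if_pos ha]
          rw [ih.1 (acc ++ [pvNorm c]) (by simp) (by simp [alnum_ne_underscore ha])]
          simp [f2, ha]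
      · by_cases hu : pvNorm c = '_'
        · constructor
          · intro acc hne hlast
            simp only [List.foldl_cons, pvStep, if_neg ha, if_pos (And.intro hu (And.intro hne hlast))]
            rw [ih.2 (acc ++ ['_']) (by simp)]
            simp [f1, hu, isalnum_underscore]
          · intro acc hlast
            have : ¬ (pvNorm c = '_' ∧ acc ≠ [] ∧ acc.getLast? ≠ some '_') := by
              intro ⟨_, _, h3⟩; exact h3 hlast
            simp only [List.foldl_cons, pvStep, if_neg ha, if_neg this]
            rw [ih.2 acc hlast]
            simp [f2, ha]
        · constructor
          · intro acc hne hlast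
            have : ¬ (pvNorm c = '_' ∧ acc ≠ [] ∧ acc.getLast? ≠ some '_') := by
              intro ⟨h1, _, _⟩; exact hu h1
            simp only [List.foldl_cons, pvStep, if_neg ha, if_neg this]
            rw [ih.1 acc hne hlast]
            simp [f1, ha, hu]
          · intro acc hlast
            have : ¬ (pvNorm c = '_' ∧ acc ≠ [] ∧ acc.getLast? ≠ some '_') := by
              intro ⟨_, _, h3⟩; exact h3 hlast
            simp only [List.foldl_cons, pvStep, if_neg ha, if_neg this]
            rw [ih.2 acc hlast]
            simp [f2, ha]

lemma fold0 (t : List Char) : List.foldl pvStep [] t = f0 t := by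
  induction t with
  | nil => simp [f0]
  | cons c u ih =>
      by_cases ha : PySem.Chars.isalnum (pvNorm c) = true
      · simp only [List.foldl_cons, pvStep, if_pos ha, List.nil_append]
        rw [(foldB u).1 [pvNorm c] (by simp) (by simp [alnum_ne_underscore ha])]
        simp [f0, ha]
      · simp only [List.foldl_cons, pvStep, if_neg ha,
          if_neg (by intro ⟨_, h2, _⟩; exact h2 rfl : ¬ (pvNorm c = '_' ∧ ([] : List Char) ≠ [] ∧ ([] : List Char).getLast? ≠ some '_'))]
        rw [ih]
        simp [f0, ha]

lemma stripT_cons (x : Char) (l : List Char) (h : l ≠ [] ∨ x ≠ '_') :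
    stripT (x :: l) = x :: stripT l := by
  cases l with
  | nil =>
      rcases h with h | h
      · exact absurd rfl h
      · simp [stripT, h]
  | cons y m =>
      simp only [stripT, List.getLast?_cons_cons]
      split <;> simp_all

lemma C12 (t : List Char) : G1 t = stripT (f1 t) ∧ G2 t = stripT ('_' :: f2 t) := by
  induction t with
  | nil => constructor <;> simp [G1, G2, f1, f2, stripT]
  | cons c u ih =>
      by_cases ha : PySem.Chars.isalnum (pvNorm c) = true
      · constructor
        · rw [G1, if_pos ha, f1, if_pos ha, stripT_cons _ _ (Or.inr (alnum_ne_underscore ha)), ih.1]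
        · rw [G2, if_pos ha, f2, if_pos ha,
            stripT_cons '_' _ (Or.inl (by simp)),
            stripT_cons _ _ (Or.inr (alnum_ne_underscore ha)), ih.1]
      · by_cases hu : pvNorm c = '_'
        · constructor
          · rw [G1, if_neg ha, if_pos hu, f1, if_neg ha, if_pos hu]
            exact ih.2
          · rw [G2, if_neg ha, f2, if_neg ha]
            exact ih.2
        · constructor
          · rw [G1, if_neg ha, if_neg hu, f1, if_neg ha, if_neg hu]
            exact ih.1
          · rw [G2, if_neg ha, f2, if_neg ha]
            exact ih.2

lemma C0 (t : List Char) : G0 t = stripT (f0 t) := by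
  induction t with
  | nil => simp [G0, f0, stripT]
  | cons c u ih =>
      by_cases ha : PySem.Chars.isalnum (pvNorm c) = true
      · rw [G0, if_pos ha, f0, if_pos ha, stripT_cons _ _ (Or.inr (alnum_ne_underscore ha)), (C12 u).1]
      · rw [G0, if_neg ha, f0, if_neg ha]
        exact ih

lemma kernel (s : List Char) :
    PySem.Chars.join ['_'] ((PySem.Chars.splitOn
        (if ((s.map pvNorm).filter (fun c => PySem.Chars.isalnum c || c == '_')) ≠ [] ∧
            PySem.Chars.isdigit (((s.map pvNorm).filter (fun c => PySem.Chars.isalnum c || c == '_')).headD ' ') = true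
         then '_' :: ((s.map pvNorm).filter (fun c => PySem.Chars.isalnum c || c == '_'))
         else ((s.map pvNorm).filter (fun c => PySem.Chars.isalnum c || c == '_'))) ['_']).filter (fun p => !p.isEmpty))
    = (if (s.foldl pvStep []).getLast? = some '_' then (s.foldl pvStep []).dropLast else s.foldl pvStep []) := by
  rw [splitOn_underscore]
  have hm : (s.map pvNorm).filter (fun c => PySem.Chars.isalnum c || c == '_') = mList s := rfl
  rw [hm]
  have hJ : ∀ x, PySem.Chars.join ['_'] ((splitU x).filter (fun p => !p.isEmpty)) = JU x := fun _ => rfl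
  rw [hJ]
  have hB : (if (s.foldl pvStep []).getLast? = some '_' then (s.foldl pvStep []).dropLast
              else s.foldl pvStep []) = stripT (f0 s) := by rw [fold0]; rfl
  rw [hB, ← C0, ← JU_mList]
  split
  · rw [JU_underscore]
  · rfl

-- ===== VERDICT (by name: the statement is the Claim_ definition above) =====
theorem clean_csv_header_py_spec : Claim_equal_clean_csv_header_py := by
  intro h _
  unfold Spec_clean_csv_header_py clean_csv_header_py clean_csv_header_py_alt
  by_cases he : h.toList = []
  · simp [he]
  · rw [if_neg he, if_neg he]
    simp only []
    rw [replace_chain, kernel]
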